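-- pv_equiv track=rewrite | github.com/qigang47/pm15minv2 | src/pm15min/live/trading/auth.py | _split_rpc_list
-- ===== SOURCE A (Python) =====
-- def _split_rpc_list(raw: object) -> list[str]:
--     if raw is None:
--         return []
--     text = str(raw).strip()
--     if not text:
--         return []
--     parts = [part.strip() for token in text.replace(";", ",").split(",") for part in token.split()]
--     return [part for part in parts if part]
-- ===== SOURCE B (Python) =====
-- def _split_rpc_list(raw: object) -> list[str]:
--     if raw is None:
--         return []
--     tokens = []
--     cur = []
--     for ch in str(raw):
--         if ch.isspace() or ch == "," or ch == ";":
--             if cur: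
--                 tokens.append("".join(cur))
--                 cur = []
--         else:
--             cur.append(ch)
--     if cur:
--         tokens.append("".join(cur))
--     return tokens
-- ===== Notes on version B (the rewrite author's own statement) =====
-- stated objective: alternative
-- what changed: Replaces A's replace/split/per-token-split/strip/filter pipeline with a single left-to-right character scan that accumulates tokens directly, flushing the current token at each separator (whitespace, ',' or ';').
import Mathlib
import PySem

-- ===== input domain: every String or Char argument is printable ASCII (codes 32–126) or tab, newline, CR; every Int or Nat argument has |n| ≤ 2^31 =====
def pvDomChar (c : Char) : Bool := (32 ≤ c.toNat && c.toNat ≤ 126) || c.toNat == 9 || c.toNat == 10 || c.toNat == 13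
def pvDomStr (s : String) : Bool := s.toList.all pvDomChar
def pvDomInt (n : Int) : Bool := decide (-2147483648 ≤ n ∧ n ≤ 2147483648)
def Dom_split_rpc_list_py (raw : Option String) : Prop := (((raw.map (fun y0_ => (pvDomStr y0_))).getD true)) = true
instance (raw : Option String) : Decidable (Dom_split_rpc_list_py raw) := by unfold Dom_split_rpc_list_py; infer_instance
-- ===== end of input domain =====

-- B replaces A's replace/split/split/strip/filter pipeline with one single-pass character
-- scan that accumulates tokens directly (objective: alternative algorithm, same result).

-- ===== PORT A =====
-- literal transliteration of A's pipeline (replace ';'→',', split on ',', each token .split(),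
-- strip each part, drop empties); string ops are the PySem.Chars definitions on .toList
def split_rpc_list_py (raw : Option String) : List String :=
  match raw with
  | none => []
  | some s =>
    let text := PySem.Str.strip s
    if text = "" then []
    else
      let parts := (PySem.Chars.splitOn (PySem.Chars.replace text.toList [';'] [',']) [',']).flatMap
        (fun token => (PySem.Chars.split₀ token).map PySem.Chars.strip)
      (parts.filter (fun p => !p.isEmpty)).map String.ofList

-- ===== PORT B =====
-- B-side helper: the separator test `ch.isspace() or ch == "," or ch == ";"`
def pvIsSep (c : Char) : Bool := PySem.Chars.isspace c || c == ',' || c == ';'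

-- literal transliteration of B: one fold over the characters with state (tokens, cur)
def split_rpc_list_py_alt (raw : Option String) : List String :=
  match raw with
  | none => []
  | some s =>
    let fin := s.toList.foldl
      (fun (st : List (List Char) × List Char) ch =>
        if pvIsSep ch then
          (if st.2.isEmpty then st.1 else st.1 ++ [st.2], [])
        else
          (st.1, st.2 ++ [ch]))
      ([], [])
    (if fin.2.isEmpty then fin.1 else fin.1 ++ [fin.2]).map String.ofList

-- ===== PRECONDITION & SPEC =====
def Spec_split_rpc_list_py (raw : Option String) (out : List String) : Prop := out = split_rpc_list_py_alt raw
instance (raw : Option String) (out : List String) : Decidable (Spec_split_rpc_list_py raw out) := by unfold Spec_split_rpc_list_py; infer_instance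

-- ===== CLAIM (what is proved, stated in full; the proofs are below) =====
def Claim_equal_split_rpc_list_py : Prop := ∀ (raw : Option String), Dom_split_rpc_list_py raw → Spec_split_rpc_list_py raw (split_rpc_list_py raw)

-- ===== LEMMAS AND PROOFS =====

-- canonical tokenizer: tokens of the stream, `cur` being the (separator-free) token in progress
def pvToks (p : Char → Bool) : List Char → List Char → List (List Char)
  | cur, [] => if cur.isEmpty then [] else [cur]
  | cur, c :: l => if p c then (if cur.isEmpty then pvToks p [] l else cur :: pvToks p [] l)
                   else pvToks p (cur ++ [c]) l

-- single-char split (mirrors Python's str.split(d)); `cur` is the piece in progress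
def pvPd (d : Char) : List Char → List Char → List (List Char)
  | cur, [] => [cur]
  | cur, c :: l => if c = d then cur :: pvPd d [] l else pvPd d (cur ++ [c]) l

theorem pvToks_congr (p q : Char → Bool) (l : List Char)
    (h : ∀ c ∈ l, p c = q c) : ∀ cur, pvToks p cur l = pvToks q cur l := by
  induction l with
  | nil => intro cur; rfl
  | cons c l ih =>
    intro cur
    have hc : p c = q c := h c (by simp)
    have ihl := ih (fun c hcl => h c (by simp [hcl]))
    simp only [pvToks, hc]
    by_cases hq : q c = true <;> simp [hq, ihl]

theorem pvToks_close (p : Char → Bool) {s : Char} (hs : p s = true) (ys : List Char) :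
    ∀ (xs : List Char) (cur : List Char),
      pvToks p cur (xs ++ s :: ys) = pvToks p cur xs ++ pvToks p [] ys := by
  intro xs
  induction xs with
  | nil => intro cur; by_cases h : cur.isEmpty <;> simp [pvToks, hs, h]
  | cons x xs ih =>
    intro cur
    by_cases hx : p x = true
    · by_cases h : cur.isEmpty <;> simp [pvToks, hx, h, ih]
    · simp [pvToks, hx, ih]

theorem pvToks_all_sep (p : Char → Bool) (ys : List Char) (hys : ∀ c ∈ ys, p c = true) :
    ∀ cur, pvToks p cur ys = if cur.isEmpty then [] else [cur] := by
  induction ys with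
  | nil => intro cur; rfl
  | cons y ys ih =>
    intro cur
    have hy : p y = true := hys y (by simp)
    have ih' := ih (fun c hc => hys c (by simp [hc])) []
    by_cases h : cur.isEmpty <;> simp [pvToks, hy, h, ih']

theorem pvToks_drop_trailing (p : Char → Bool) (ys : List Char) (hys : ∀ c ∈ ys, p c = true) :
    ∀ (xs cur : List Char), pvToks p cur (xs ++ ys) = pvToks p cur xs := by
  intro xs
  induction xs with
  | nil =>
    intro cur
    simp only [List.nil_append, pvToks_all_sep p ys hys cur]
    rfl
  | cons x xs ih =>
    intro cur
    by_cases hx : p x = true <;> simp [pvToks, hx, ih]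

theorem pvToks_drop_leading (p q : Char → Bool) (himp : ∀ c, q c = true → p c = true)
    (l : List Char) : pvToks p [] (List.dropWhile q l) = pvToks p [] l := by
  induction l with
  | nil => rfl
  | cons c l ih =>
    by_cases hq : q c = true
    · have hp := himp c hq
      simp [List.dropWhile, hq, pvToks, hp, ih]
    · simp [List.dropWhile, hq]

theorem pvToks_nonempty (p : Char → Bool) (l : List Char) :
    ∀ cur, cur.all (fun c => !p c) = true →
      ∀ tok ∈ pvToks p cur l, tok ≠ [] ∧ tok.all (fun c => !p c) = true := by
  induction l with
  | nil =>
    intro cur hcur tok htok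
    by_cases h : cur.isEmpty
    · simp [pvToks, h] at htok
    · simp only [pvToks, h, Bool.false_eq_true, if_false, List.mem_singleton] at htok
      subst htok
      exact ⟨by simpa [List.isEmpty_iff] using h, hcur⟩
  | cons c l ih =>
    intro cur hcur tok htok
    by_cases hc : p c = true
    · by_cases h : cur.isEmpty
      · simp only [pvToks, hc, if_true, h] at htok
        exact ih [] (by simp) tok htok
      · simp only [pvToks, hc, if_true, h, Bool.false_eq_true, if_false] at htok
        rcases List.mem_cons.mp htok with rfl | htok
        · exact ⟨by simpa [List.isEmpty_iff] using h, hcur⟩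
        · exact ih [] (by simp) tok htok
    · simp only [pvToks, hc, Bool.false_eq_true, if_false] at htok
      refine ih (cur ++ [c]) ?_ tok htok
      simp_all

-- fusion: split on d first, then tokenize each piece on q = tokenize on (q ∨ · = d)
theorem pvFusion (d : Char) (q : Char → Bool) :
    ∀ (l cur : List Char), d ∉ cur →
      (pvPd d cur l).flatMap (pvToks q []) = pvToks (fun c => q c || c = d) [] (cur ++ l) := by
  intro l
  induction l with
  | nil =>
    intro cur hcur
    simp only [pvPd, List.flatMap_cons, List.flatMap_nil, List.append_nil]
    exact pvToks_congr q (fun c => q c || c = d) cur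
      (fun c hc => by
        have : ¬ c = d := fun h => hcur (h ▸ hc)
        simp [this]) []
  | cons c l ih =>
    intro cur hcur
    by_cases hc : c = d
    · subst hc
      simp only [pvPd, if_true, List.flatMap_cons]
      have ihnil := ih [] (List.not_mem_nil)
      simp only [List.nil_append] at ihnil
      rw [ihnil, pvToks_close (fun x => q x || x = c) (by simp) l cur []]
      congr 1
      exact pvToks_congr q (fun x => q x || x = c) cur
        (fun x hx => by
          have : ¬ x = c := fun h => hcur (h ▸ hx)
          simp [this]) []
    · simp only [pvPd, hc, if_false]
      rw [ih (cur ++ [c]) (by simp [hcur]; exact fun h => hc h.symm)]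
      simp

-- replace with single-char old/new is a map
theorem pvReplace_go (old new : Char) :
    ∀ (fuel : Nat) (l acc : List Char), l.length ≤ fuel →
      PySem.Chars.replace.go [old] [new] fuel l acc
        = acc.reverse ++ l.map (fun c => if c = old then new else c) := by
  intro fuel
  induction fuel with
  | zero =>
    intro l acc h
    have hl : l = [] := by simpa [List.length_eq_zero_iff] using Nat.le_zero.mp h
    simp [hl, PySem.Chars.replace.go]
  | succ fuel ih =>
    intro l acc h
    match l with
    | [] => simp [PySem.Chars.replace.go]
    | c :: rest =>
      simp only [List.length_cons, Nat.succ_le_succ_iff] at h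
      by_cases hc : c = old
      · have hp : List.isPrefixOf [old] (c :: rest) = true := by
          subst hc; simp [List.isPrefixOf]
        simp only [PySem.Chars.replace.go, hp, if_true, List.length_cons, List.length_nil,
          List.drop_succ_cons, List.drop_zero, List.reverse_cons, List.reverse_nil, List.nil_append]
        rw [ih rest ([new] ++ acc) h]
        simp [hc]
      · have hp : List.isPrefixOf [old] (c :: rest) = false := by
          simp [List.isPrefixOf]; exact fun h' => hc h'.symm
        simp only [PySem.Chars.replace.go, hp, Bool.false_eq_true, if_false]
        rw [ih rest (c :: acc) h]
        simp [hc]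

theorem pvReplace_single (old new : Char) (l : List Char) :
    PySem.Chars.replace l [old] [new] = l.map (fun c => if c = old then new else c) := by
  simp only [PySem.Chars.replace, List.isEmpty_cons, Bool.false_eq_true, if_false]
  exact pvReplace_go old new l.length l [] (le_refl _)

-- splitOn with single-char separator is pvPd
theorem pvSplitOn_go (d : Char) :
    ∀ (fuel : Nat) (l cur : List Char) (acc : List (List Char)), l.length ≤ fuel →
      PySem.Chars.splitOn.go [d] fuel l cur acc = acc.reverse ++ pvPd d cur.reverse l := by
  intro fuel
  induction fuel with
  | zero =>
    intro l cur acc h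
    have hl : l = [] := by simpa [List.length_eq_zero_iff] using Nat.le_zero.mp h
    simp [hl, PySem.Chars.splitOn.go, pvPd]
  | succ fuel ih =>
    intro l cur acc h
    match l with
    | [] => simp [PySem.Chars.splitOn.go, pvPd]
    | c :: rest =>
      simp only [List.length_cons, Nat.succ_le_succ_iff] at h
      by_cases hc : c = d
      · have hp : List.isPrefixOf [d] (c :: rest) = true := by subst hc; simp [List.isPrefixOf]
        simp only [PySem.Chars.splitOn.go, hp, if_true, List.length_cons, List.length_nil,
          List.drop_succ_cons, List.drop_zero]
        rw [ih rest [] (cur.reverse :: acc) h]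
        simp [pvPd, hc]
      · have hp : List.isPrefixOf [d] (c :: rest) = false := by
          simp [List.isPrefixOf]; exact fun h' => hc h'.symm
        simp only [PySem.Chars.splitOn.go, hp, Bool.false_eq_true, if_false]
        rw [ih rest (c :: cur) acc h]
        simp [pvPd, hc]

theorem pvSplitOn_single (d : Char) (l : List Char) :
    PySem.Chars.splitOn l [d] = pvPd d [] l := by
  simpa using pvSplitOn_go d (l.length + 1) l [] [] (by omega)

-- split₀ is pvToks with isspace
theorem pvSplit₀_go :
    ∀ (l cur : List Char) (acc : List (List Char)),
      PySem.Chars.split₀.go l cur acc = acc.reverse ++ pvToks PySem.Chars.isspace cur.reverse l := by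
  intro l
  induction l with
  | nil =>
    intro cur acc
    by_cases h : cur.isEmpty
    · have : cur.reverse.isEmpty = true := by simp_all [List.isEmpty_iff]
      simp [PySem.Chars.split₀.go, pvToks, h, this]
    · have : cur.reverse.isEmpty = false := by simp_all [List.isEmpty_iff]
      simp [PySem.Chars.split₀.go, pvToks, h, this]
  | cons c rest ih =>
    intro cur acc
    by_cases hc : PySem.Chars.isspace c = true
    · by_cases h : cur.isEmpty
      · have hr : cur.reverse.isEmpty = true := by simp_all [List.isEmpty_iff]
        simp [PySem.Chars.split₀.go, pvToks, hc, h, hr, ih]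
      · have hr : cur.reverse.isEmpty = false := by simp_all [List.isEmpty_iff]
        simp [PySem.Chars.split₀.go, pvToks, hc, h, hr, ih]
    · simp [PySem.Chars.split₀.go, pvToks, hc, ih]

theorem pvSplit₀_toks (l : List Char) :
    PySem.Chars.split₀ l = pvToks PySem.Chars.isspace [] l := by
  simpa using pvSplit₀_go l [] []

-- strip is the identity on whitespace-free lists
theorem pvStrip_id (l : List Char) (h : l.all (fun c => !PySem.Chars.isspace c) = true) :
    PySem.Chars.strip l = l := by
  simp only [List.all_eq_true] at h
  have h1 : PySem.Chars.lstrip l = l :=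
    List.dropWhile_eq_self_iff.mpr (fun hl => by
      simpa using h _ (List.getElem_mem hl))
  have h2 : PySem.Chars.rstrip l = l := by
    simp only [PySem.Chars.rstrip]
    rw [List.dropWhile_eq_self_iff.mpr (fun hl => by
      simpa using h _ (List.mem_reverse.mp (List.getElem_mem hl)))]
    simp
  calc PySem.Chars.strip l = PySem.Chars.rstrip (PySem.Chars.lstrip l) := rfl
    _ = l := by rw [h1, h2]

-- the sw map ';'→',' turns tokenizing on (isspace ∨ ',') into tokenizing on pvIsSep
theorem pvMap_sw (l : List Char) :
    ∀ cur, pvToks (fun c => PySem.Chars.isspace c || c = ',') cur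
        (l.map (fun c => if c = ';' then ',' else c)) = pvToks pvIsSep cur l := by
  induction l with
  | nil => intro cur; rfl
  | cons c l ih =>
    intro cur
    by_cases hc : c = ';'
    · subst hc
      simp [pvToks, pvIsSep, ih]
    · have hval : (PySem.Chars.isspace c || decide (c = ',')) = pvIsSep c := by
        have h1 : (c == ';') = false := beq_eq_false_iff_ne.mpr hc
        have h2 : (c == ',') = decide (c = ',') := by by_cases h : c = ',' <;> simp [h]
        simp [pvIsSep, h1, h2]
      simp only [List.map_cons, if_neg hc, pvToks, hval]
      by_cases hq : pvIsSep c = true <;> simp [hq, ih]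

-- B's fold computes pvToks
def pvFinish (st : List (List Char) × List Char) : List (List Char) :=
  if st.2.isEmpty then st.1 else st.1 ++ [st.2]

theorem pvFold_toks (l : List Char) :
    ∀ (acc : List (List Char)) (cur : List Char),
      pvFinish (l.foldl (fun (st : List (List Char) × List Char) ch =>
            if pvIsSep ch then
              (if st.2.isEmpty then st.1 else st.1 ++ [st.2], [])
            else (st.1, st.2 ++ [ch])) (acc, cur))
        = acc ++ pvToks pvIsSep cur l := by
  induction l with
  | nil => intro acc cur; by_cases h : cur.isEmpty <;> simp [pvFinish, pvToks, h]
  | cons c l ih =>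
    intro acc cur
    rw [List.foldl_cons]
    by_cases hc : pvIsSep c = true
    · by_cases h : cur.isEmpty
      · simp only [hc, if_true, h]
        rw [ih acc []]
        simp [pvToks, hc, h]
      · simp only [hc, if_true, h, Bool.false_eq_true, if_false]
        rw [ih (acc ++ [cur]) []]
        simp [pvToks, hc, h]
    · simp only [hc, Bool.false_eq_true, if_false]
      rw [ih acc (cur ++ [c])]
      simp [pvToks, hc]

-- strip at the front does not change the tokens (all stripped chars are separators)
theorem pvToks_strip (l : List Char) :
    pvToks pvIsSep [] (PySem.Chars.strip l) = pvToks pvIsSep [] l := by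
  have himp : ∀ c, PySem.Chars.isspace c = true → pvIsSep c = true := by
    intro c h; simp [pvIsSep, h]
  have hl : pvToks pvIsSep [] (PySem.Chars.lstrip l) = pvToks pvIsSep [] l :=
    pvToks_drop_leading pvIsSep PySem.Chars.isspace himp l
  have hr : ∀ m : List Char, pvToks pvIsSep [] (PySem.Chars.rstrip m) = pvToks pvIsSep [] m := by
    intro m
    have hdecomp : m = PySem.Chars.rstrip m ++ (m.reverse.takeWhile PySem.Chars.isspace).reverse := by
      simp only [PySem.Chars.rstrip]
      rw [← List.reverse_append, List.takeWhile_append_dropWhile, List.reverse_reverse]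
    calc pvToks pvIsSep [] (PySem.Chars.rstrip m)
        = pvToks pvIsSep [] (PySem.Chars.rstrip m ++ (m.reverse.takeWhile PySem.Chars.isspace).reverse) := by
          rw [pvToks_drop_trailing pvIsSep _ (fun c hc => by
            have : c ∈ m.reverse.takeWhile PySem.Chars.isspace := List.mem_reverse.mp hc
            exact himp c (List.mem_takeWhile_imp this))]
      _ = pvToks pvIsSep [] m := by rw [← hdecomp]
  rw [show PySem.Chars.strip l = PySem.Chars.rstrip (PySem.Chars.lstrip l) from rfl, hr, hl]

-- A's whole pipeline (after the guards) computes pvToks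
theorem pvA_pipeline (T : List Char) :
    ((PySem.Chars.splitOn (PySem.Chars.replace T [';'] [',']) [',']).flatMap
        (fun token => (PySem.Chars.split₀ token).map PySem.Chars.strip)).filter (fun p => !p.isEmpty)
      = pvToks pvIsSep [] T := by
  have hinner : ∀ token : List Char,
      (PySem.Chars.split₀ token).map PySem.Chars.strip = pvToks PySem.Chars.isspace [] token := by
    intro token
    rw [pvSplit₀_toks]
    rw [List.map_congr_left (g := id) (fun tok htok =>
      pvStrip_id tok ((pvToks_nonempty PySem.Chars.isspace token [] (by simp) tok htok).2))]
    simp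
  rw [pvReplace_single, pvSplitOn_single]
  simp only [hinner]
  rw [pvFusion ',' PySem.Chars.isspace _ [] (List.not_mem_nil)]
  simp only [List.nil_append]
  rw [pvMap_sw T []]
  exact List.filter_eq_self.mpr (fun tok htok => by
    have h1 := (pvToks_nonempty pvIsSep T [] (by simp) tok htok).1
    simp [h1])

-- ===== VERDICT (by name: the statement is the Claim_ definition above) =====
theorem split_rpc_list_py_spec : Claim_equal_split_rpc_list_py := by
  intro raw _
  unfold Spec_split_rpc_list_py
  cases raw with
  | none => rfl
  | some s =>
    have hB : split_rpc_list_py_alt (some s) = (pvToks pvIsSep [] s.toList).map String.ofList := by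
      simp only [split_rpc_list_py_alt]
      have h := pvFold_toks s.toList [] []
      simp only [pvFinish, List.nil_append] at h
      rw [h]
    have hstrip : (PySem.Str.strip s).toList = PySem.Chars.strip s.toList := PySem.Str.toList_strip s
    by_cases ht : PySem.Str.strip s = ""
    · have hnil : PySem.Chars.strip s.toList = [] := by
        rw [← hstrip, ht]; rfl
      have htoks : pvToks pvIsSep [] s.toList = [] := by
        rw [← pvToks_strip, hnil]; rfl
      simp only [split_rpc_list_py, hB, htoks, ht, List.map_nil]
      simp
    · simp only [split_rpc_list_py, if_neg ht, hB, hstrip]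
      rw [pvA_pipeline, pvToks_strip]
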